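-- pv_equiv track=rewrite | github.com/Rootse/high_school | additional_8_tasks/task_3_eec_help.py | EEC_help
-- ===== SOURCE A (Python) =====
-- def EEC_help(arr1: list[int], arr2: list[int]) -> bool:
--     if len(arr1) != len(arr2):
--         return False
--
--     dict1, dict2 = {}, {}
--
--     for i in arr1:
--         dict1[i] = dict1.get(i, 0) + 1
--
--     for i in arr2:
--         dict2[i] = dict2.get(i, 0) + 1
--
--     return dict1 == dict2
-- ===== SOURCE B (Python) =====
-- def EEC_help(arr1: list[int], arr2: list[int]) -> bool:
--     return sorted(arr1) == sorted(arr2)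
-- ===== Notes on version B (the rewrite author's own statement) =====
-- stated objective: simpler
-- what changed: Replaced the two frequency-counting dict loops and dict comparison with a single sort-and-compare: sorted(arr1) == sorted(arr2).
import Mathlib
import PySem

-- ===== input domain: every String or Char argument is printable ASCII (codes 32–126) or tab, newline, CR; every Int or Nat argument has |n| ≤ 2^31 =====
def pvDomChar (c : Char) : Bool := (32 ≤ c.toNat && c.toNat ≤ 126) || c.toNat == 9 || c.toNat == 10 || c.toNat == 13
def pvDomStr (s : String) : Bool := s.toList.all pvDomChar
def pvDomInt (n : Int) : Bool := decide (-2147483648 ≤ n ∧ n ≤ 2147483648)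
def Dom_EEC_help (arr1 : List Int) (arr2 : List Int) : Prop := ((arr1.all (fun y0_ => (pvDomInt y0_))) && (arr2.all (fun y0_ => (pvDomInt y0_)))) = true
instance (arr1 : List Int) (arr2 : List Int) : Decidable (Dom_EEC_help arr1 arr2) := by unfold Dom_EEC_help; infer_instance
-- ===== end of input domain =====

-- B replaces A's two dict-counting loops and dict comparison by sort-and-compare (simpler).

-- ===== PORT A =====
-- Python 'dict1 == dict2': insertion order is ignored, so compare size and first-key lookups.
def pyDictEqInt (d1 d2 : PySem.Dict Int Int) : Bool :=
  d1.size == d2.size && d1.items.all (fun p => d2.get? p.1 == some p.2)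

def EEC_help (arr1 : List Int) (arr2 : List Int) : Bool :=
  if arr1.length ≠ arr2.length then false
  else
    let dict1 := arr1.foldl (fun d i => d.insert i (d.getD i 0 + 1)) PySem.Dict.empty
    let dict2 := arr2.foldl (fun d i => d.insert i (d.getD i 0 + 1)) PySem.Dict.empty
    pyDictEqInt dict1 dict2

-- ===== PORT B =====
def EEC_help_alt (arr1 : List Int) (arr2 : List Int) : Bool :=
  decide (PySem.List.sorted arr1 (fun x => x) false = PySem.List.sorted arr2 (fun x => x) false)

-- ===== PRECONDITION & SPEC =====
def Spec_EEC_help (arr1 : List Int) (arr2 : List Int) (out : Bool) : Prop := out = EEC_help_alt arr1 arr2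
instance (arr1 : List Int) (arr2 : List Int) (out : Bool) : Decidable (Spec_EEC_help arr1 arr2 out) := by unfold Spec_EEC_help; infer_instance

-- ===== CLAIM (what is proved, stated in full; the proofs are below) =====
def Claim_equal_EEC_help : Prop := ∀ (arr1 : List Int) (arr2 : List Int), Dom_EEC_help arr1 arr2 → Spec_EEC_help arr1 arr2 (EEC_help arr1 arr2)

-- ===== LEMMAS AND PROOFS =====

-- Python dict equality of the two counters holds exactly when the lists are permutations.
theorem pyDictEqInt_counter (xs ys : List Int) :
    pyDictEqInt (PySem.Dict.counter xs) (PySem.Dict.counter ys) = decide (xs.Perm ys) := by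
  have hitems : ∀ (l : List Int), (PySem.Dict.counter l).items
      = (PySem.Set.ofList l).map (fun k => (k, (l.count k : Int))) := fun l =>
    PySem.Dict.items_counter l
  by_cases hperm : xs.Perm ys
  · simp only [hperm, decide_true]
    have hmem : ∀ a : Int, a ∈ xs ↔ a ∈ ys := fun a => hperm.mem_iff
    have hset : (PySem.Set.ofList xs).Perm (PySem.Set.ofList ys) := by
      rw [List.perm_ext_iff_of_nodup (PySem.Set.nodup_ofList xs) (PySem.Set.nodup_ofList ys)]
      intro a; simp [PySem.Set.mem_ofList, hmem a]
    unfold pyDictEqInt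
    simp only [Bool.and_eq_true]
    constructor
    · have : (PySem.Dict.counter xs).size = (PySem.Dict.counter ys).size := by
        simp only [PySem.Dict.size, hitems, List.length_map]
        exact hset.length_eq
      simp [this]
    · rw [List.all_eq_true]
      intro p hp
      rw [hitems] at hp
      obtain ⟨k, hk, rfl⟩ := List.mem_map.mp hp
      have hky : k ∈ ys := (hmem k).mp ((PySem.Set.mem_ofList xs k).mp hk)
      have : (PySem.Dict.counter ys).get? k = some ((ys.count k : Int)) := by
        apply PySem.Dict.get?_of_mem_items _ _ (PySem.Dict.nodup_keys_counter ys)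
        rw [hitems]
        exact List.mem_map.mpr ⟨k, (PySem.Set.mem_ofList ys k).mpr hky, rfl⟩
      simp [this, hperm.count_eq]
  · simp only [hperm, decide_false]
    unfold pyDictEqInt
    rw [Bool.and_eq_false_iff]
    by_cases hall : ((PySem.Dict.counter xs).items.all
        (fun p => (PySem.Dict.counter ys).get? p.1 == some p.2)) = true
    · left
      -- from the lookups, every x-element has equal counts in ys; if sizes also agreed the lists would be permutations
      have hc : ∀ k ∈ xs, ys.count k = xs.count k ∧ k ∈ ys := by
        intro k hkx
        have hp : (k, (xs.count k : Int)) ∈ (PySem.Dict.counter xs).items := by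
          rw [hitems]
          exact List.mem_map.mpr ⟨k, (PySem.Set.mem_ofList xs k).mpr hkx, rfl⟩
        have := (List.all_eq_true.mp hall) _ hp
        simp only [beq_iff_eq] at this
        have hmemit := PySem.Dict.mem_items_of_get?_eq_some (d := PySem.Dict.counter ys) this
        rw [hitems] at hmemit
        obtain ⟨k', hk', hk'eq⟩ := List.mem_map.mp hmemit
        have hkk : k' = k := congrArg Prod.fst hk'eq
        have hcnt : (ys.count k' : Int) = (xs.count k : Int) := congrArg Prod.snd hk'eq
        rw [hkk] at hcnt hk'
        exact ⟨by exact_mod_cast hcnt, (PySem.Set.mem_ofList ys k).mp hk'⟩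
      by_contra hsz
      apply hperm
      simp only [Bool.not_eq_false, beq_iff_eq] at hsz
      -- sizes equal: the distinct-element lists are permutations, so membership coincides
      have hsub : PySem.Set.ofList xs ⊆ PySem.Set.ofList ys := by
        intro a ha
        exact (PySem.Set.mem_ofList ys a).mpr ((hc a ((PySem.Set.mem_ofList xs a).mp ha)).2)
      have hlen : (PySem.Set.ofList ys).length ≤ (PySem.Set.ofList xs).length := by
        have := hsz
        simp only [PySem.Dict.size, hitems, List.length_map] at this
        omega
      have hsp : (PySem.Set.ofList xs).Perm (PySem.Set.ofList ys) :=
        ((PySem.Set.nodup_ofList xs).subperm hsub).perm_of_length_le hlen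
      rw [List.perm_iff_count]
      intro a
      by_cases hax : a ∈ xs
      · exact (hc a hax).1.symm
      · have hay : a ∉ ys := by
          intro hay
          exact hax ((PySem.Set.mem_ofList xs a).mp
            (hsp.mem_iff.mpr ((PySem.Set.mem_ofList ys a).mpr hay)))
        rw [List.count_eq_zero_of_not_mem hax, List.count_eq_zero_of_not_mem hay]
    · right
      exact Bool.eq_false_iff.mpr hall

theorem EEC_help_eq_perm (arr1 arr2 : List Int) :
    EEC_help arr1 arr2 = decide (arr1.Perm arr2) := by
  unfold EEC_help
  split_ifs with h
  · have : ¬ arr1.Perm arr2 := fun hp => h hp.length_eq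
    simp [this]
  · simp only
    rw [PySem.Dict.foldl_insert_getD_add_one_eq_counter,
        PySem.Dict.foldl_insert_getD_add_one_eq_counter]
    exact pyDictEqInt_counter arr1 arr2

-- ===== VERDICT (by name: the statement is the Claim_ definition above) =====
theorem EEC_help_spec : Claim_equal_EEC_help := by
  intro arr1 arr2 _
  unfold Spec_EEC_help EEC_help_alt
  rw [EEC_help_eq_perm]
  exact decide_eq_decide.mpr (PySem.List.sorted_id_eq_sorted_id_iff_perm arr1 arr2).symm
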